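-- pv_equiv track=rewrite | github.com/Jerenyaoyelu/Python-Programming---COMP9021 | Quiz/5/quiz_5.py | create_code_table
-- ===== SOURCE A (Python) =====
-- def create_code_table(n):
--     code_l=[0,-1]
--     for i in range(2,n):
--         if i%2==0:
--             code_l.append(code_l[0]-code_l[i-1])
--         else:
--             code_l.append(code_l[1]-code_l[i-1])
--     return code_l
-- ===== SOURCE B (Python) =====
-- def create_code_table(n):
--     return [0, -1] + [i // 2 if i % 2 == 0 else -((i + 1) // 2) for i in range(2, n)]
-- ===== Notes on version B (the rewrite author's own statement) =====
-- stated objective: simpler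
-- what changed: Replaces A's predecessor-referencing recurrence (each new entry computed from existing list elements) with a direct closed-form per-index formula i//2 / -((i+1)//2) appended to the constant two-element seed, reading no earlier element.
import Mathlib
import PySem

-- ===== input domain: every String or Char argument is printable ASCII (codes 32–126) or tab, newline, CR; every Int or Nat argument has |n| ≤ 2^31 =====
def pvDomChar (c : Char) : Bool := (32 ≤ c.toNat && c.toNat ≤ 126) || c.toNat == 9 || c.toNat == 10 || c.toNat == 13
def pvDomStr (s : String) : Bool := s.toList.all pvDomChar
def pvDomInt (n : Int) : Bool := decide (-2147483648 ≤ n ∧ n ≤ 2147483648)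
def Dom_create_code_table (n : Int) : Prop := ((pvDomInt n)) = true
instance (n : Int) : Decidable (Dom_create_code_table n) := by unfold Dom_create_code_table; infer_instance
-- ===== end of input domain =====

-- B replaces A's predecessor-referencing recurrence with a direct per-index closed form; objective: simpler.

-- ===== PORT A =====
-- literal port of A: fold over range(2, n), appending code_l[0]-code_l[i-1] or code_l[1]-code_l[i-1]
def create_code_table (n : Int) : List Int :=
  (PySem.List.pyRange 2 n 1).foldl
    (fun code_l i =>
      if PySem.Int.mod i 2 == 0 then
        code_l ++ [PySem.List.pyGetD code_l 0 0 - PySem.List.pyGetD code_l (i - 1) 0]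
      else
        code_l ++ [PySem.List.pyGetD code_l 1 0 - PySem.List.pyGetD code_l (i - 1) 0])
    [0, -1]

-- ===== PORT B =====
-- literal port of Source B: [0,-1] + comprehension over range(2, n) with a closed form per index
def create_code_table_alt (n : Int) : List Int :=
  [0, -1] ++ (PySem.List.pyRange 2 n 1).map
    (fun i => if PySem.Int.mod i 2 == 0 then PySem.Int.floordiv i 2
              else -(PySem.Int.floordiv (i + 1) 2))

-- ===== PRECONDITION & SPEC =====
def Spec_create_code_table (n : Int) (out : List Int) : Prop := out = create_code_table_alt n
instance (n : Int) (out : List Int) : Decidable (Spec_create_code_table n out) := by unfold Spec_create_code_table; infer_instance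

-- ===== CLAIM (what is proved, stated in full; the proofs are below) =====
def Claim_equal_create_code_table : Prop := ∀ (n : Int), Dom_create_code_table n → Spec_create_code_table n (create_code_table n)

-- ===== LEMMAS AND PROOFS =====

-- the closed-form entry of B (f 0 = 0, f 1 = -1 match the two seeds)
def pvF (i : Int) : Int :=
  if PySem.Int.mod i 2 == 0 then PySem.Int.floordiv i 2 else -(PySem.Int.floordiv (i + 1) 2)

-- the recurrence step applied to the closed form reproduces the closed form
lemma pvF_step (k : Int) (hk : 2 ≤ k) :
    (if PySem.Int.mod k 2 == 0 then pvF 0 else pvF 1) - pvF (k - 1) = pvF k := by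
  unfold pvF
  have h2 : (0:Int) < 2 := by omega
  simp only [PySem.Int.mod_eq_emod_of_pos h2, PySem.Int.floordiv_eq_ediv_of_pos h2,
    beq_iff_eq]
  split_ifs <;> omega

-- the seeds are the closed form at indices 0 and 1
lemma pvSeed (k : Int) (hk : 2 ≤ k) :
    [0, -1] ++ (PySem.List.pyRange 2 k 1).map pvF = (PySem.List.pyRange 0 k 1).map pvF := by
  rw [PySem.List.pyRange_one_append 0 2 k (by omega) hk, List.map_append]
  rfl

-- loop invariant: after processing range(2, 2+m), A's list is the closed-form table
lemma pvInvariant (m : Nat) :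
    (PySem.List.pyRange 2 (2 + (m : Int)) 1).foldl
      (fun code_l i =>
        if PySem.Int.mod i 2 == 0 then
          code_l ++ [PySem.List.pyGetD code_l 0 0 - PySem.List.pyGetD code_l (i - 1) 0]
        else
          code_l ++ [PySem.List.pyGetD code_l 1 0 - PySem.List.pyGetD code_l (i - 1) 0])
      [0, -1]
    = (PySem.List.pyRange 0 (2 + (m : Int)) 1).map pvF := by
  induction m with
  | zero =>
    rw [PySem.List.pyRange_one_eq_nil (by omega)]
    decide
  | succ m ih =>
    have h1 : (2 : Int) + ((m + 1 : Nat) : Int) = (2 + (m : Int)) + 1 := by push_cast; ring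
    rw [h1, PySem.List.pyRange_one_succ_right (by omega), List.foldl_append, ih,
        PySem.List.pyRange_one_succ_right (a := 0) (by omega), List.map_append]
    set k : Int := 2 + (m : Int) with hkdef
    have hk : 2 ≤ k := by omega
    have hget : ∀ (i : Int), 0 ≤ i → i < k →
        PySem.List.pyGetD ((PySem.List.pyRange 0 k 1).map pvF) i 0 = pvF i := by
      intro i h0 hik
      exact PySem.List.pyGetD_map_pyRange_of_nonneg pvF k i 0 h0 hik
    have h0 := hget 0 (by omega) (by omega)
    have h1' := hget 1 (by omega) (by omega)
    have hlast := hget (k - 1) (by omega) (by omega)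
    simp only [List.foldl_cons, List.foldl_nil, List.map_cons, List.map_nil, h0, h1', hlast]
    rw [← pvF_step k hk]
    split_ifs <;> rfl

-- ===== VERDICT (by name: the statement is the Claim_ definition above) =====
theorem create_code_table_spec : Claim_equal_create_code_table := by
  intro n _
  unfold Spec_create_code_table create_code_table create_code_table_alt
  by_cases hn : n ≤ 2
  · rw [PySem.List.pyRange_one_eq_nil hn]
    rfl
  · have hm : n = 2 + ((n - 2).toNat : Int) := by omega
    rw [hm, pvInvariant, ← pvSeed (2 + ((n - 2).toNat : Int)) (by omega)]
    rfl
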